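-- pv_equiv track=rewrite | github.com/KhronosGroup/SYCL-CTS | runtests.py | find_packet
-- ===== SOURCE A (Python) =====
-- def find_packet( in_buffer ):
--
--     l_start = in_buffer.find( '{' )
--     l_end   =-1
--     l_scope = 1
--
--     if l_start > -1:
--         for x in range( l_start+1, len( in_buffer ) ):
--             if in_buffer[x] == '{':
--                 l_scope += 1
--             if in_buffer[x] == '}':
--                 l_scope -= 1
--             if l_scope is 0:
--                 l_end = x+1
--                 break
--
--     return l_start, l_end
-- ===== SOURCE B (Python) =====
-- def _match(s, i):
--     # index just past the '}' that closes the '{' at position i, or -1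
--     j = i + 1
--     while j < len(s):
--         c = s[j]
--         if c == '}':
--             return j + 1
--         if c == '{':
--             j = _match(s, j)
--             if j == -1:
--                 return -1
--         else:
--             j += 1
--     return -1
--
--
-- def find_packet(in_buffer):
--     l_start = in_buffer.find('{')
--     if l_start == -1:
--         return -1, -1
--     return l_start, _match(in_buffer, l_start)
-- ===== Notes on version B (the rewrite author's own statement) =====
-- stated objective: alternative
-- what changed: Replaces the iterative depth-counter scan with a recursive-descent matcher: a helper recursively matches each nested brace region and resumes past it, so no depth variable exists at all.
import Mathlib
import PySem

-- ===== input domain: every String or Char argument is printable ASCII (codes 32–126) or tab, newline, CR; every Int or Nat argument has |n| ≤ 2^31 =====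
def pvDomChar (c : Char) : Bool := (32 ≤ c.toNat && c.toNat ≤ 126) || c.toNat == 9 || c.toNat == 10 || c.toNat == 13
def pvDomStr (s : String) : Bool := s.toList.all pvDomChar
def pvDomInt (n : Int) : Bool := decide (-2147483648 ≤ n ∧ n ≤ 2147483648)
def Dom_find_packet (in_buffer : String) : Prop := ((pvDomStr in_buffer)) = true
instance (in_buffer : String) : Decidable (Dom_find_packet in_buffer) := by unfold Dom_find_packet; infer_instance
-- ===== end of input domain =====

-- B replaces A's iterative depth-counter scan by a recursive-descent matcher (objective: alternative).

-- ===== PORT A =====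
-- the `for x in range(l_start+1, len(in_buffer))` loop with its break, scope in the accumulator
def findA_loop (s : List Char) (x : Nat) (scope : Int) : Int :=
  if h : x < s.length then
    let c := s[x]
    let scope1 := if c = '{' then scope + 1 else scope
    let scope2 := if c = '}' then scope1 - 1 else scope1
    if scope2 = 0 then (x : Int) + 1
    else findA_loop s (x + 1) scope2
  else -1
termination_by s.length - x

def find_packet (in_buffer : String) : Int × Int :=
  let l_start := PySem.Str.find in_buffer "{"
  if l_start > -1 then (l_start, findA_loop in_buffer.toList (l_start.toNat + 1) 1)
  else (l_start, -1)

-- ===== PORT B =====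
-- the `while j < len(s)` body of Source B's _match; fuel only makes the nested recursion total
def matchLoop (s : List Char) (j : Nat) : Nat → Int
  | 0 => -1
  | f + 1 =>
    if h : j < s.length then
      if s[j] = '}' then (j : Int) + 1
      else if s[j] = '{' then
        let r := matchLoop s (j + 1) f     -- _match(s, j) scans from j+1
        if r = -1 then -1 else matchLoop s r.toNat f
      else matchLoop s (j + 1) f
    else -1

def find_packet_alt (in_buffer : String) : Int × Int :=
  let l_start := PySem.Str.find in_buffer "{"
  if l_start = -1 then (-1, -1)
  else (l_start, matchLoop in_buffer.toList (l_start.toNat + 1) (in_buffer.toList.length + 1))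

-- ===== PRECONDITION & SPEC =====
def Spec_find_packet (in_buffer : String) (out : Int × Int) : Prop := out = find_packet_alt in_buffer
instance (in_buffer : String) (out : Int × Int) : Decidable (Spec_find_packet in_buffer out) := by unfold Spec_find_packet; infer_instance

-- ===== CLAIM (what is proved, stated in full; the proofs are below) =====
def Claim_equal_find_packet : Prop := ∀ (in_buffer : String), Dom_find_packet in_buffer → Spec_find_packet in_buffer (find_packet in_buffer)

-- ===== LEMMAS AND PROOFS =====

-- one-step unfoldings of A's scan, by the character at x
lemma findA_end (s : List Char) (x : Nat) (scope : Int) (hx : ¬ x < s.length) :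
    findA_loop s x scope = -1 := by rw [findA_loop, dif_neg hx]

lemma findA_open (s : List Char) (x : Nat) (scope : Int) (hx : x < s.length)
    (hc : s[x] = '{') :
    findA_loop s x scope =
      if scope + 1 = 0 then (x : Int) + 1 else findA_loop s (x + 1) (scope + 1) := by
  rw [findA_loop, dif_pos hx]; simp [hc]

lemma findA_close (s : List Char) (x : Nat) (scope : Int) (hx : x < s.length)
    (hc : s[x] = '}') :
    findA_loop s x scope =
      if scope - 1 = 0 then (x : Int) + 1 else findA_loop s (x + 1) (scope - 1) := by
  rw [findA_loop, dif_pos hx]; simp [hc]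

lemma findA_other (s : List Char) (x : Nat) (scope : Int) (hx : x < s.length)
    (hc1 : ¬ s[x] = '{') (hc2 : ¬ s[x] = '}') :
    findA_loop s x scope =
      if scope = 0 then (x : Int) + 1 else findA_loop s (x + 1) scope := by
  rw [findA_loop, dif_pos hx]; simp [hc1, hc2]

-- A's scan either fails (-1) or returns an index strictly past x and at most len
lemma findA_bounds (s : List Char) : ∀ (n x : Nat) (scope : Int), s.length - x ≤ n →
    findA_loop s x scope = -1 ∨ ((x : Int) < findA_loop s x scope ∧ findA_loop s x scope ≤ s.length) := by
  intro n
  induction n with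
  | zero =>
    intro x scope h
    rw [findA_end s x scope (by omega)]
    exact Or.inl rfl
  | succ n ih =>
    intro x scope h
    by_cases hx : x < s.length
    · have step : ∀ s2 : Int,
          (if s2 = 0 then (x : Int) + 1 else findA_loop s (x + 1) s2) = -1 ∨
          ((x : Int) < (if s2 = 0 then (x : Int) + 1 else findA_loop s (x + 1) s2) ∧
            (if s2 = 0 then (x : Int) + 1 else findA_loop s (x + 1) s2) ≤ s.length) := by
        intro s2
        by_cases hz : s2 = 0
        · rw [if_pos hz]; right; constructor <;> [omega; exact_mod_cast hx]
        · rw [if_neg hz]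
          rcases ih (x + 1) s2 (by omega) with h' | h'
          · exact Or.inl h'
          · right; push_cast at h' ⊢; omega
      by_cases hc1 : s[x] = '{'
      · rw [findA_open s x scope hx hc1]; exact step _
      · by_cases hc2 : s[x] = '}'
        · rw [findA_close s x scope hx hc2]; exact step _
        · rw [findA_other s x scope hx hc1 hc2]; exact step _
    · rw [findA_end s x scope hx]; exact Or.inl rfl

-- depth composition: scanning at depth k+1 = find where depth drops once, then continue at depth k
lemma findA_compose (s : List Char) : ∀ (n x : Nat) (k : Int), s.length - x ≤ n → 1 ≤ k →
    findA_loop s x (k + 1) =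
      if findA_loop s x 1 = -1 then -1 else findA_loop s (findA_loop s x 1).toNat k := by
  intro n
  induction n with
  | zero =>
    intro x k h hk
    rw [findA_end s x (k + 1) (by omega), findA_end s x 1 (by omega)]
    simp
  | succ n ih =>
    intro x k h hk
    by_cases hx : x < s.length
    · by_cases hc1 : s[x] = '{'
      · rw [findA_open s x (k + 1) hx hc1, findA_open s x 1 hx hc1]
        rw [if_neg (by omega : ¬ k + 1 + 1 = 0), if_neg (by decide : ¬ (1 : Int) + 1 = 0)]
        rw [ih (x + 1) (k + 1) (by omega) (by omega)]
        have h2 : findA_loop s (x + 1) (1 + 1) =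
            if findA_loop s (x + 1) 1 = -1 then -1
            else findA_loop s (findA_loop s (x + 1) 1).toNat 1 :=
          ih (x + 1) 1 (by omega) (by omega)
        rw [h2]
        by_cases hr : findA_loop s (x + 1) 1 = -1
        · simp [hr]
        · rw [if_neg hr, if_neg hr]
          rcases findA_bounds s s.length (x + 1) 1 (by omega) with h' | h'
          · exact absurd h' hr
          · rw [ih (findA_loop s (x + 1) 1).toNat k (by omega) hk]
      · by_cases hc2 : s[x] = '}'
        · rw [findA_close s x (k + 1) hx hc2, findA_close s x 1 hx hc2]
          rw [if_neg (by omega : ¬ k + 1 - 1 = 0), if_pos (by decide : (1 : Int) - 1 = 0)]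
          rw [if_neg (by omega : ¬ ((x : Int) + 1) = -1)]
          have h1 : ((x : Int) + 1).toNat = x + 1 := by omega
          have h2 : k + 1 - 1 = k := by omega
          rw [h1, h2]
        · rw [findA_other s x (k + 1) hx hc1 hc2, findA_other s x 1 hx hc1 hc2]
          rw [if_neg (by omega : ¬ k + 1 = 0), if_neg (by decide : ¬ (1 : Int) = 0)]
          exact ih (x + 1) k (by omega) hk
    · rw [findA_end s x (k + 1) hx, findA_end s x 1 hx]
      simp

-- B's recursive matcher computes A's depth-1 scan, given enough fuel
lemma matchLoop_eq (s : List Char) : ∀ (f j : Nat), s.length - j < f →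
    matchLoop s j f = findA_loop s j 1 := by
  intro f
  induction f with
  | zero => intro j h; omega
  | succ f ih =>
    intro j h
    rw [matchLoop]
    by_cases hj : j < s.length
    · rw [dif_pos hj]
      by_cases hc2 : s[j] = '}'
      · rw [if_pos hc2, findA_close s j 1 hj hc2, if_pos (by decide : (1 : Int) - 1 = 0)]
      · rw [if_neg hc2]
        by_cases hc1 : s[j] = '{'
        · rw [if_pos hc1, findA_open s j 1 hj hc1, if_neg (by decide : ¬ (1 : Int) + 1 = 0)]
          have hr : matchLoop s (j + 1) f = findA_loop s (j + 1) 1 := ih (j + 1) (by omega)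
          rw [findA_compose s s.length (j + 1) 1 (by omega) (by omega)]
          dsimp only
          rw [hr]
          by_cases hneg : findA_loop s (j + 1) 1 = -1
          · rw [if_pos hneg, if_pos hneg]
          · rw [if_neg hneg, if_neg hneg]
            rcases findA_bounds s s.length (j + 1) 1 (by omega) with h' | h'
            · exact absurd h' hneg
            · exact ih (findA_loop s (j + 1) 1).toNat (by omega)
        · rw [if_neg hc1, findA_other s j 1 hj hc1 hc2,
            if_neg (by decide : ¬ (1 : Int) = 0)]
          exact ih (j + 1) (by omega)
    · rw [dif_neg hj, findA_end s j 1 hj]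

-- ===== VERDICT (by name: the statement is the Claim_ definition above) =====
theorem find_packet_spec : Claim_equal_find_packet := by
  intro in_buffer _
  unfold Spec_find_packet find_packet find_packet_alt
  dsimp only
  by_cases hneg : PySem.Str.find in_buffer "{" = -1
  · rw [if_pos hneg, hneg]
    rw [if_neg (by decide : ¬ (-1 : Int) > -1)]
  · have hge : PySem.Str.find in_buffer "{" > -1 := by
      have h1 : -1 ≤ PySem.Str.find in_buffer "{" := by
        rw [PySem.Str.find_eq]
        exact PySem.Chars.neg_one_le_find _ _
      omega
    rw [if_neg hneg, if_pos hge]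
    rw [matchLoop_eq in_buffer.toList (in_buffer.toList.length + 1)
      ((PySem.Str.find in_buffer "{").toNat + 1) (by omega)]
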